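-- pv_equiv track=rewrite | github.com/Oizys18/Algo | 2019/1908/190822/05.py | calc_ran
-- ===== SOURCE A (Python) =====
-- def my_sum(x, y, k, total_map):
--     new_sum = 0
--     for i in range(y, y + k, ):
--         if i == y or i == y + k - 1:
--             for j in range(x, x + k, ):
--                 new_sum += total_map[i][j]
--         else:
--             new_sum += total_map[i][x] + total_map[i][x + k - 1]
--     return new_sum
--
-- def calc_ran(n, m, k, total_map):
--     x_ran = m - k + 1
--     y_ran = n - k + 1
--     result = []
--     for y in range(y_ran):
--         for x in range(x_ran):
--             result.append(my_sum(x, y, k, total_map))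
--     return result
-- ===== SOURCE B (Python) =====
-- def calc_ran(n, m, k, total_map):
--     # Row and column prefix sums over the n x m grid, then each k x k
--     # perimeter sum is O(1): top row + bottom row + the two side columns
--     # of the middle rows, each read off as a difference of two prefixes.
--     rows = [row[:m] for row in total_map[:n]]
--     rp = []
--     for row in rows:
--         p = [0]
--         for v in row:
--             p.append(p[-1] + v)
--         rp.append(p)
--     cp = []
--     for col in zip(*rows):
--         p = [0]
--         for v in col:
--             p.append(p[-1] + v)
--         cp.append(p)
--     result = []
--     for y in range(n - k + 1):
--         for x in range(m - k + 1):
--             per = rp[y][x + k] - rp[y][x]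
--             if k > 1:
--                 per += rp[y + k - 1][x + k] - rp[y + k - 1][x]
--                 per += cp[x][y + k - 1] - cp[x][y + 1]
--                 per += cp[x + k - 1][y + k - 1] - cp[x + k - 1][y + 1]
--             result.append(per)
--     return result
-- ===== Notes on version B (the rewrite author's own statement) =====
-- stated objective: alternative
-- what changed: Replaces the per-window O(k) perimeter walk with row and column prefix-sum tables built once, so each k-by-k perimeter is read off as four prefix differences.
-- outside the precondition, e.g. on calc_ran(2, 2, 0, [[1, 2], [3, 4]]): A returns [0, 0, 0, 0, 0, 0, 0, 0, 0], B raises IndexError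
import Mathlib
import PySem

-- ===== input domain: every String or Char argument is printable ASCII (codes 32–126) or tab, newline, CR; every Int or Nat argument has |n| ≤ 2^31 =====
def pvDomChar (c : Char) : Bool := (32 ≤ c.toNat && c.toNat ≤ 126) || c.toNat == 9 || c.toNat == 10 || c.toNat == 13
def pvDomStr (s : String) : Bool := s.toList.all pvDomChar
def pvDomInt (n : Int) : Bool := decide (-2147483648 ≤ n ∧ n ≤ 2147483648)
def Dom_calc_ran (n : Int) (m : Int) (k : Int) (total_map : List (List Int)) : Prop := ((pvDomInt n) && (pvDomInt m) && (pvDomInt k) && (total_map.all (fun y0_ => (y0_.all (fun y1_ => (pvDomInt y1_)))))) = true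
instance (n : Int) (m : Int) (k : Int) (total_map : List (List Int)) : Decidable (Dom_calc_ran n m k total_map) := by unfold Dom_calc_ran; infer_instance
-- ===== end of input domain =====

-- B replaces A's per-window perimeter walk by row/column prefix-sum tables built
-- once, so each perimeter is a difference of prefixes (alternative algorithm).


-- ===== PORT A =====
-- total_map[i][j]  (always in range under Pre_, so the default never surfaces)
def pvCell (tm : List (List Int)) (i j : Int) : Int :=
  PySem.List.pyGetD (PySem.List.pyGetD tm i []) j 0

-- literal transliteration of A's my_sum
def pvMySum (x y k : Int) (tm : List (List Int)) : Int :=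
  (PySem.List.pyRange y (y + k) 1).foldl (fun s i =>
    if i = y ∨ i = y + k - 1 then
      (PySem.List.pyRange x (x + k) 1).foldl (fun s2 j => s2 + pvCell tm i j) s
    else
      s + pvCell tm i x + pvCell tm i (x + k - 1)) 0

def calc_ran (n : Int) (m : Int) (k : Int) (total_map : List (List Int)) : List Int :=
  (PySem.List.pyRange 0 (n - k + 1) 1).foldl (fun res y =>
    (PySem.List.pyRange 0 (m - k + 1) 1).foldl (fun res x =>
      res ++ [pvMySum x y k total_map]) res) []

-- ===== PORT B =====
-- p = [0]; for v in l: p.append(p[-1] + v)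
def pvPrefix (l : List Int) : List Int :=
  l.foldl (fun p v => p ++ [PySem.List.pyGetD p (-1) 0 + v]) [0]

-- [row[:m] for row in total_map[:n]]
def pvRowsOf (n m : Int) (tm : List (List Int)) : List (List Int) :=
  (PySem.List.slice tm none (some n)).map (fun r => PySem.List.slice r none (some m))

-- zip(*rows): the columns, truncated to the shortest row (exactly Python's zip)
def pvZipStar (rows : List (List Int)) : List (List Int) :=
  match rows with
  | [] => []
  | r0 :: rest =>
      (List.range (rest.foldl (fun acc r => min acc r.length) r0.length)).map
        (fun j => rows.map (fun r => r.getD j 0))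

-- the loop body: one perimeter, four prefix differences
def pvPerim (rp cp : List (List Int)) (k x y : Int) : Int :=
  let per := PySem.List.pyGetD (PySem.List.pyGetD rp y []) (x + k) 0
           - PySem.List.pyGetD (PySem.List.pyGetD rp y []) x 0
  if 1 < k then
    per + (PySem.List.pyGetD (PySem.List.pyGetD rp (y + k - 1) []) (x + k) 0
         - PySem.List.pyGetD (PySem.List.pyGetD rp (y + k - 1) []) x 0)
        + (PySem.List.pyGetD (PySem.List.pyGetD cp x []) (y + k - 1) 0
         - PySem.List.pyGetD (PySem.List.pyGetD cp x []) (y + 1) 0)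
        + (PySem.List.pyGetD (PySem.List.pyGetD cp (x + k - 1) []) (y + k - 1) 0
         - PySem.List.pyGetD (PySem.List.pyGetD cp (x + k - 1) []) (y + 1) 0)
  else per

def calc_ran_alt (n : Int) (m : Int) (k : Int) (total_map : List (List Int)) : List Int :=
  let rows := pvRowsOf n m total_map
  let rp := rows.map pvPrefix
  let cp := (pvZipStar rows).map pvPrefix
  (PySem.List.pyRange 0 (n - k + 1) 1).foldl (fun res y =>
    (PySem.List.pyRange 0 (m - k + 1) 1).foldl (fun res x =>
      res ++ [pvPerim rp cp k x y]) res) []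

-- ===== PRECONDITION & SPEC =====
-- Pre_ excludes k ≤ 0 when the loops would still run (degenerate window size, outside
-- the task's natural domain: there A returns a list of zeros of size (n-k+1)*(m-k+1)
-- without touching the grid, while B's prefix differences raise), and, whenever at
-- least one k×k window exists, requires the grid to really have n rows of at least m
-- cells — exactly the shape on which A itself completes without an IndexError.
def Pre_calc_ran (n : Int) (m : Int) (k : Int) (total_map : List (List Int)) : Prop :=
  (1 ≤ k ∨ n - k + 1 ≤ 0 ∨ m - k + 1 ≤ 0) ∧ ((1 ≤ k ∧ k ≤ n ∧ k ≤ m) →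
    ((n : Int) ≤ total_map.length ∧
      ∀ row ∈ total_map.take n.toNat, (m : Int) ≤ row.length))
instance (n : Int) (m : Int) (k : Int) (total_map : List (List Int)) : Decidable (Pre_calc_ran n m k total_map) := by unfold Pre_calc_ran; infer_instance

def pvWitness_calc_ran : Int × Int × Int × List (List Int) :=
  (3, 3, 2, [[1, 2, 3], [4, 5, 6], [7, 8, 9]])

def Spec_calc_ran (n : Int) (m : Int) (k : Int) (total_map : List (List Int)) (out : List Int) : Prop := out = calc_ran_alt n m k total_map
instance (n : Int) (m : Int) (k : Int) (total_map : List (List Int)) (out : List Int) : Decidable (Spec_calc_ran n m k total_map out) := by unfold Spec_calc_ran; infer_instance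

-- ===== CLAIM (what is proved, stated in full; the proofs are below) =====
def Claim_equal_calc_ran : Prop := ∀ (n : Int) (m : Int) (k : Int) (total_map : List (List Int)), Dom_calc_ran n m k total_map → Pre_calc_ran n m k total_map → Spec_calc_ran n m k total_map (calc_ran n m k total_map)

-- ===== LEMMAS AND PROOFS =====

-- pvPrefix is scanl (+)
theorem pvPrefix_foldl (l : List Int) (acc : List Int) (a : Int) :
    l.foldl (fun p v => p ++ [PySem.List.pyGetD p (-1) 0 + v]) (acc ++ [a])
      = acc ++ l.scanl (· + ·) a := by
  induction l generalizing acc a with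
  | nil => simp
  | cons v l ih =>
      rw [List.foldl_cons, PySem.List.pyGetD_neg_one_append_singleton,
          List.scanl_cons]
      have : (acc ++ [a]) ++ [a + v] = (acc ++ [a]) ++ [a + v] := rfl
      rw [show acc ++ a :: List.scanl (· + ·) (a + v) l
            = (acc ++ [a]) ++ List.scanl (· + ·) (a + v) l by simp]
      exact ih (acc ++ [a]) (a + v)

theorem pvPrefix_eq_scanl (l : List Int) : pvPrefix l = l.scanl (· + ·) 0 := by
  have h := pvPrefix_foldl l [] 0
  simpa [pvPrefix] using h

theorem pvScanl_getD (l : List Int) (a : Int) (i : Nat) (h : i ≤ l.length) :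
    (l.scanl (· + ·) a).getD i 0 = a + (l.take i).sum := by
  induction l generalizing a i with
  | nil =>
      have : i = 0 := by simpa using h
      subst this
      simp [List.scanl]
  | cons v l ih =>
      cases i with
      | zero => simp [List.scanl_cons]
      | succ i =>
          rw [List.scanl_cons, List.getD_cons_succ,
              ih (a + v) i (by simpa using h), List.take_succ_cons,
              List.sum_cons]
          ring

theorem pvPrefix_getD (l : List Int) (i : Nat) (h : i ≤ l.length) :
    (pvPrefix l).getD i 0 = (l.take i).sum := by
  rw [pvPrefix_eq_scanl, pvScanl_getD l 0 i h, zero_add]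

theorem pvDropTake (l : List Int) (a len : Nat) (h : a + len ≤ l.length) :
    (l.drop a).take len = (List.range len).map (fun t => l.getD (a + t) 0) := by
  apply List.ext_getElem
  · simp; omega
  · intro i h1 h2
    have hi : i < len := by simp at h2; omega
    have hai : a + i < l.length := by omega
    simp [List.getElem_drop, List.getElem_take, List.getD_eq_getElem?_getD,
          List.getElem?_eq_getElem hai]

theorem pvPrefix_diff (l : List Int) (a b : Nat) (hab : a ≤ b) (hb : b ≤ l.length) :
    (pvPrefix l).getD b 0 - (pvPrefix l).getD a 0
      = ((List.range (b - a)).map (fun t => l.getD (a + t) 0)).sum := by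
  rw [pvPrefix_getD l b hb, pvPrefix_getD l a (le_trans hab hb),
      ← pvDropTake l a (b - a) (by omega),
      show b = a + (b - a) by omega, List.take_add, List.sum_append,
      show a + (b - a) - a = b - a by omega]
  ring

theorem pvFoldlMin (rest : List (List Int)) (acc : Nat)
    (h : ∀ r ∈ rest, acc ≤ r.length) :
    rest.foldl (fun acc r => min acc r.length) acc = acc := by
  induction rest generalizing acc with
  | nil => rfl
  | cons r rest ih =>
      rw [List.foldl_cons, Nat.min_eq_left (h r (by simp))]
      exact ih acc (fun r' hr' => h r' (by simp [hr']))


theorem pvRowsOf_eq (n m : Int) (tm : List (List Int)) (h0n : 0 ≤ n) (h0m : 0 ≤ m) :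
    pvRowsOf n m tm = (tm.take n.toNat).map (fun r => r.take m.toNat) := by
  unfold pvRowsOf
  rw [PySem.List.slice_to tm h0n]
  exact List.map_congr_left (fun r _ => PySem.List.slice_to r h0m)

theorem pvRowDiff (n m : Int) (tm : List (List Int))
    (hlen : (n : Int) ≤ tm.length)
    (hrow : ∀ row ∈ tm.take n.toNat, (m : Int) ≤ row.length)
    (i a b : Int) (hi0 : 0 ≤ i) (hi1 : i < n)
    (ha : 0 ≤ a) (hab : a ≤ b) (hbm : b ≤ m) :
    PySem.List.pyGetD (PySem.List.pyGetD ((pvRowsOf n m tm).map pvPrefix) i []) b 0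
      - PySem.List.pyGetD (PySem.List.pyGetD ((pvRowsOf n m tm).map pvPrefix) i []) a 0
      = ((PySem.List.pyRange a b 1).map (fun j => pvCell tm i j)).sum := by
  have h0n : (0 : Int) ≤ n := by omega
  have h0m : (0 : Int) ≤ m := by omega
  have hrowsOf := pvRowsOf_eq n m tm h0n h0m
  have hitm : i.toNat < tm.length := by omega
  have hitn : i.toNat < n.toNat := by omega
  have hml : (m : Int) ≤ (tm[i.toNat]).length := by
    apply hrow
    have h := List.getElem_mem (l := tm.take n.toNat) (n := i.toNat)
      (by simp; omega)
    rwa [List.getElem_take] at h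
  have hrplen : ((pvRowsOf n m tm).map pvPrefix).length = n.toNat := by
    rw [hrowsOf]; simp; omega
  have hrpi : PySem.List.pyGetD ((pvRowsOf n m tm).map pvPrefix) i []
      = pvPrefix ((tm[i.toNat]).take m.toNat) := by
    conv_lhs => rw [show i = ((i.toNat : Nat) : Int) by omega]
    rw [PySem.List.pyGetD_natCast, hrowsOf, List.map_map,
        List.getD_eq_getElem _ _ (by simp; omega)]
    simp [List.getElem_take]
  have hlm : ((tm[i.toNat]).take m.toNat).length = m.toNat := by simp; omega
  rw [hrpi,
      show b = ((b.toNat : Nat) : Int) by omega, PySem.List.pyGetD_natCast,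
      show a = ((a.toNat : Nat) : Int) by omega, PySem.List.pyGetD_natCast,
      pvPrefix_diff _ a.toNat b.toNat (by omega) (by rw [hlm]; omega),
      PySem.List.pyRange_one, List.map_map,
      show (((b.toNat : Nat) : Int) - ((a.toNat : Nat) : Int)).toNat
            = b.toNat - a.toNat by omega]
  apply congrArg List.sum
  apply List.map_congr_left
  intro t ht
  rw [List.mem_range] at ht
  have h1 : a.toNat + t < m.toNat := by omega
  have h2 : a.toNat + t < (tm[i.toNat]).length := by omega
  rw [List.getD_eq_getElem _ _ (by rw [hlm]; omega), List.getElem_take]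
  show tm[i.toNat][a.toNat + t] = pvCell tm i (((a.toNat : Nat) : Int) + ((t : Nat) : Int))
  unfold pvCell
  rw [PySem.List.pyGetD_eq_getElem tm [] hi0 (by omega),
      show ((a.toNat : Nat) : Int) + ((t : Nat) : Int) = (((a.toNat + t : Nat) : Nat) : Int) by omega,
      PySem.List.pyGetD_natCast, List.getD_eq_getElem _ _ h2]

theorem pvColDiff (n m : Int) (tm : List (List Int))
    (hlen : (n : Int) ≤ tm.length)
    (hrow : ∀ row ∈ tm.take n.toNat, (m : Int) ≤ row.length)
    (hn : 0 < n)
    (c a b : Int) (hc0 : 0 ≤ c) (hc1 : c < m)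
    (ha : 0 ≤ a) (hab : a ≤ b) (hbn : b ≤ n) :
    PySem.List.pyGetD (PySem.List.pyGetD ((pvZipStar (pvRowsOf n m tm)).map pvPrefix) c []) b 0
      - PySem.List.pyGetD (PySem.List.pyGetD ((pvZipStar (pvRowsOf n m tm)).map pvPrefix) c []) a 0
      = ((PySem.List.pyRange a b 1).map (fun i => pvCell tm i c)).sum := by
  have h0n : (0 : Int) ≤ n := by omega
  have h0m : (0 : Int) ≤ m := by omega
  have hrowsOf := pvRowsOf_eq n m tm h0n h0m
  have hrl : (pvRowsOf n m tm).length = n.toNat := by rw [hrowsOf]; simp; omega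
  have hall : ∀ r ∈ pvRowsOf n m tm, r.length = m.toNat := by
    rw [hrowsOf]
    intro r hr
    rw [List.mem_map] at hr
    obtain ⟨row, hrow', rfl⟩ := hr
    have := hrow row hrow'
    simp; omega
  have hne : pvRowsOf n m tm ≠ [] := by
    intro h; rw [h] at hrl; simp at hrl; omega
  obtain ⟨r0, rest, hcons⟩ := List.exists_cons_of_ne_nil hne
  have hzip : pvZipStar (pvRowsOf n m tm)
      = (List.range m.toNat).map (fun j => (pvRowsOf n m tm).map (fun r => r.getD j 0)) := by
    rw [hcons]
    show (List.range (rest.foldl (fun acc r => min acc r.length) r0.length)).map _ = _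
    rw [pvFoldlMin rest r0.length (by
      intro r hr
      rw [hall r0 (by rw [hcons]; simp), hall r (by rw [hcons]; simp [hr])])]
    rw [hall r0 (by rw [hcons]; simp)]
  have hctm : c.toNat < m.toNat := by omega
  have hcpc : PySem.List.pyGetD ((pvZipStar (pvRowsOf n m tm)).map pvPrefix) c []
      = pvPrefix ((pvRowsOf n m tm).map (fun r => r.getD c.toNat 0)) := by
    conv_lhs => rw [show c = ((c.toNat : Nat) : Int) by omega]
    rw [PySem.List.pyGetD_natCast, hzip, List.map_map,
        List.getD_eq_getElem _ _ (by simp; omega)]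
    simp
  have hcol : ((pvRowsOf n m tm).map (fun r => r.getD c.toNat 0)).length = n.toNat := by
    rw [List.length_map, hrl]
  rw [hcpc,
      show b = ((b.toNat : Nat) : Int) by omega, PySem.List.pyGetD_natCast,
      show a = ((a.toNat : Nat) : Int) by omega, PySem.List.pyGetD_natCast,
      pvPrefix_diff _ a.toNat b.toNat (by omega) (by rw [hcol]; omega),
      PySem.List.pyRange_one, List.map_map,
      show (((b.toNat : Nat) : Int) - ((a.toNat : Nat) : Int)).toNat
            = b.toNat - a.toNat by omega]
  apply congrArg List.sum
  apply List.map_congr_left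
  intro t ht
  rw [List.mem_range] at ht
  have h1 : a.toNat + t < n.toNat := by omega
  have h1' : a.toNat + t < ((pvRowsOf n m tm).map (fun r => r.getD c.toNat 0)).length := by
    rw [hcol]; omega
  rw [List.getD_eq_getElem _ _ h1', List.getElem_map]
  have hrowi : (pvRowsOf n m tm)[a.toNat + t]'(by rw [hrl]; omega)
      = (tm[a.toNat + t]'(by omega)).take m.toNat := by
    rw [List.getElem_of_eq hrowsOf]
    simp [List.getElem_take]
  rw [hrowi]
  have hmlt : (m : Int) ≤ (tm[a.toNat + t]'(by omega)).length := by
    apply hrow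
    have h := List.getElem_mem (l := tm.take n.toNat) (n := a.toNat + t)
      (by simp; omega)
    rwa [List.getElem_take] at h
  rw [List.getD_eq_getElem _ _ (by simp; omega), List.getElem_take]
  simp only [Function.comp]
  show (tm[a.toNat + t]'(by omega))[c.toNat]'(by omega)
      = pvCell tm (((a.toNat : Nat) : Int) + ((t : Nat) : Int)) c
  unfold pvCell
  rw [show ((a.toNat : Nat) : Int) + ((t : Nat) : Int)
        = (((a.toNat + t : Nat) : Nat) : Int) by omega,
      PySem.List.pyGetD_natCast, List.getD_eq_getElem _ _ (by omega)]
  conv_rhs => rw [show c = ((c.toNat : Nat) : Int) by omega]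
  rw [PySem.List.pyGetD_natCast, List.getD_eq_getElem _ _ (by omega)]

theorem pvMySum_eq (x y k : Int) (tm : List (List Int)) (hk : 1 ≤ k) :
    pvMySum x y k tm
      = ((PySem.List.pyRange x (x + k) 1).map (fun j => pvCell tm y j)).sum
        + (if 1 < k then
             ((PySem.List.pyRange x (x + k) 1).map (fun j => pvCell tm (y + k - 1) j)).sum
           + (((PySem.List.pyRange (y + 1) (y + k - 1) 1).map (fun i => pvCell tm i x)).sum
            + ((PySem.List.pyRange (y + 1) (y + k - 1) 1).map (fun i => pvCell tm i (x + k - 1))).sum)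
           else 0) := by
  rcases eq_or_lt_of_le hk with h1 | h2
  · -- k = 1: the only row is both top and bottom
    subst h1
    unfold pvMySum
    rw [PySem.List.pyRange_one_singleton y]
    simp only [List.foldl_cons, List.foldl_nil]
    split_ifs with hc1 hc2
    · exact absurd hc2 (by omega)
    · rw [PySem.List.foldl_add]
      simp
    · exact absurd (Or.inl trivial) hc1
    · exact absurd (Or.inl trivial) hc1
  · -- k ≥ 2: top row, middle rows, bottom row
    unfold pvMySum
    have hsing : PySem.List.pyRange (y + k - 1) (y + k) 1 = [y + k - 1] := by
      have h := PySem.List.pyRange_one_singleton (y + k - 1)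
      rw [show (y + k - 1) + 1 = y + k by ring] at h
      exact h
    rw [PySem.List.pyRange_one_append y (y + 1) (y + k) (by omega) (by omega),
        PySem.List.pyRange_one_append (y + 1) (y + k - 1) (y + k) (by omega) (by omega),
        List.foldl_append, List.foldl_append,
        PySem.List.pyRange_one_singleton y, hsing]
    simp only [List.foldl_cons, List.foldl_nil]
    rw [if_pos (Or.inl trivial : True ∨ y = y + k - 1),
        if_pos (Or.inr trivial : y + k - 1 = y ∨ True)]
    rw [PySem.List.foldl_congr_mem (PySem.List.pyRange (y + 1) (y + k - 1) 1)
          _ (fun s i => s + (pvCell tm i x + pvCell tm i (x + k - 1))) _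
          (by
            intro acc i hi
            rw [PySem.List.mem_pyRange_one] at hi
            rw [if_neg (by rintro (h | h) <;> omega)]
            ring)]
    simp only [PySem.List.foldl_add]
    rw [PySem.List.sum_map_add_int, if_pos h2]
    ring

theorem pvPoint (n m k : Int) (tm : List (List Int))
    (hlen : (n : Int) ≤ tm.length)
    (hrow : ∀ row ∈ tm.take n.toNat, (m : Int) ≤ row.length)
    (hk : 1 ≤ k) (x y : Int)
    (hy0 : 0 ≤ y) (hy1 : y < n - k + 1) (hx0 : 0 ≤ x) (hx1 : x < m - k + 1) :
    pvMySum x y k tm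
      = pvPerim ((pvRowsOf n m tm).map pvPrefix)
          ((pvZipStar (pvRowsOf n m tm)).map pvPrefix) k x y := by
  rw [pvMySum_eq x y k tm hk]
  simp only [pvPerim]
  by_cases h2 : 1 < k
  · rw [if_pos h2, if_pos h2,
        pvRowDiff n m tm hlen hrow y x (x + k) hy0 (by omega) hx0 (by omega) (by omega),
        pvRowDiff n m tm hlen hrow (y + k - 1) x (x + k) (by omega) (by omega) hx0 (by omega) (by omega),
        pvColDiff n m tm hlen hrow (by omega) x (y + 1) (y + k - 1) hx0 (by omega) (by omega) (by omega) (by omega),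
        pvColDiff n m tm hlen hrow (by omega) (x + k - 1) (y + 1) (y + k - 1) (by omega) (by omega) (by omega) (by omega) (by omega)]
    ring
  · rw [if_neg h2, if_neg h2,
        pvRowDiff n m tm hlen hrow y x (x + k) hy0 (by omega) hx0 (by omega) (by omega)]
    ring

-- ===== VERDICT (by name: the statement is the Claim_ definition above) =====
theorem calc_ran_spec : Claim_equal_calc_ran := by
  intro n m k tm hdom hpre
  obtain ⟨hk01, hshape⟩ := hpre
  unfold Spec_calc_ran
  have hA : calc_ran n m k tm
      = ((PySem.List.pyRange 0 (n - k + 1) 1).map (fun y =>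
          (PySem.List.pyRange 0 (m - k + 1) 1).map (fun x => pvMySum x y k tm))).flatten := by
    unfold calc_ran
    rw [show (fun (res : List Int) (y : Int) =>
              (PySem.List.pyRange 0 (m - k + 1) 1).foldl
                (fun res x => res ++ [pvMySum x y k tm]) res)
          = (fun res y => res ++ (PySem.List.pyRange 0 (m - k + 1) 1).map
                (fun x => pvMySum x y k tm)) from
          funext fun res => funext fun y =>
            PySem.List.foldl_append_singleton_eq_map _ _ _,
        PySem.List.foldl_append_eq_flatMap, List.nil_append, List.flatMap_def]
  have hB : calc_ran_alt n m k tm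
      = ((PySem.List.pyRange 0 (n - k + 1) 1).map (fun y =>
          (PySem.List.pyRange 0 (m - k + 1) 1).map (fun x =>
            pvPerim ((pvRowsOf n m tm).map pvPrefix)
              ((pvZipStar (pvRowsOf n m tm)).map pvPrefix) k x y))).flatten := by
    simp only [calc_ran_alt]
    rw [show (fun (res : List Int) (y : Int) =>
              (PySem.List.pyRange 0 (m - k + 1) 1).foldl
                (fun res x => res ++ [pvPerim ((pvRowsOf n m tm).map pvPrefix)
                  ((pvZipStar (pvRowsOf n m tm)).map pvPrefix) k x y]) res)
          = (fun res y => res ++ (PySem.List.pyRange 0 (m - k + 1) 1).map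
                (fun x => pvPerim ((pvRowsOf n m tm).map pvPrefix)
                  ((pvZipStar (pvRowsOf n m tm)).map pvPrefix) k x y)) from
          funext fun res => funext fun y =>
            PySem.List.foldl_append_singleton_eq_map _ _ _,
        PySem.List.foldl_append_eq_flatMap, List.nil_append, List.flatMap_def]
  rw [hA, hB]
  apply congrArg List.flatten
  apply List.map_congr_left
  intro y hy
  rw [PySem.List.mem_pyRange_one] at hy
  apply List.map_congr_left
  intro x hx
  rw [PySem.List.mem_pyRange_one] at hx
  have hk : 1 ≤ k := by
    rcases hk01 with h | h | h
    · exact h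
    · omega
    · omega
  obtain ⟨hlen, hrow⟩ := hshape ⟨hk, by omega, by omega⟩
  exact pvPoint n m k tm hlen hrow hk x y hy.1 hy.2 hx.1 hx.2
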